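-- pv_equiv track=rewrite | github.com/minghaoguo81/Data-Structure-and-Algorithm-Class-Solutions | Data Structure/Week 4/Common_substring.py | create_hash_table
-- ===== SOURCE A (Python) =====
-- def poly_hash(s, prime, multiplier):
--     ans = 0
--     for c in reversed(s):
--         ans = (ans * multiplier + ord(c)) % prime
--     return ans
--
-- def create_hash_table(s, len_p, prime, multiplier):
--     len_s = len(s)
--     last_substring = s[len_s-len_p:]
--     hash_table = [0 for _ in range(len_s - len_p + 1)]
--     hash_table[len_s-len_p] = poly_hash(last_substring, prime, multiplier)
--     y = pow(multiplier, len_p, prime)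
--     for i in range(len_s-len_p-1, -1, -1):
--         hash_table[i] = (multiplier*hash_table[i+1] + ord(s[i]) - y * ord(s[i+len_p])) % prime
--     return hash_table
-- ===== SOURCE B (Python) =====
-- def window_hash(s, prime, multiplier):
--     ans = 0
--     for c in reversed(s):
--         ans = (ans * multiplier + ord(c)) % prime
--     return ans % prime  # canonical representative also for the empty window
--
-- def create_hash_table(s, len_p, prime, multiplier):
--     return [window_hash(s[i:i+len_p], prime, multiplier)
--             for i in range(len(s) - len_p + 1)]
-- ===== Notes on version B (the rewrite author's own statement) =====
-- stated objective: simpler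
-- what changed: Replaces A's seeded hash table plus backward rolling-hash update loop by an independent direct polynomial hash of each window, written as a single comprehension.
import Mathlib
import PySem

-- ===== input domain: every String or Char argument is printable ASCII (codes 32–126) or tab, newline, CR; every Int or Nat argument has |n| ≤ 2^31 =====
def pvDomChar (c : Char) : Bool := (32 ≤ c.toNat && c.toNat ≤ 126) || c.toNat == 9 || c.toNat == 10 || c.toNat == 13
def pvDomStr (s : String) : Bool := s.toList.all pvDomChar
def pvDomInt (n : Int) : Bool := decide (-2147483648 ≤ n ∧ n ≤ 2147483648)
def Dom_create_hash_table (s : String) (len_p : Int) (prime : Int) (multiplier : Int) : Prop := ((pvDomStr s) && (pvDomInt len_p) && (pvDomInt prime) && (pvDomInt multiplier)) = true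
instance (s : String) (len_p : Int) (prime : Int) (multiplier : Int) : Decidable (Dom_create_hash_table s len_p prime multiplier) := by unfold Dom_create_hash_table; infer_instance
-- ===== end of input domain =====

-- B replaces A's seeded table and backward rolling-hash update loop by an independent
-- direct per-window polynomial hash (simpler: a single comprehension); same return
-- value on every input A accepts.

-- ===== PORT A =====
def poly_hash (s : List Char) (prime : Int) (multiplier : Int) : Int :=
  s.reverse.foldl (fun ans c => PySem.Int.mod (ans * multiplier + (c.toNat : Int)) prime) 0

def create_hash_table (s : String) (len_p : Int) (prime : Int) (multiplier : Int) : List Int :=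
  let cs := s.toList
  let len_s : Int := (cs.length : Int)
  let last_substring := PySem.List.slice cs (some (len_s - len_p)) none
  let hash_table : List Int := List.replicate (len_s - len_p + 1).toNat 0
  -- hash_table[len_s-len_p] = …: in range under Pre_ (pySetD is the total form of that assignment)
  let hash_table := PySem.List.pySetD hash_table (len_s - len_p) (poly_hash last_substring prime multiplier)
  -- pow(multiplier, len_p, prime): exact for len_p ≥ 0 (Pre_); .toNat only interprets the exponent as a Nat
  let y := PySem.Int.powMod multiplier len_p.toNat prime
  (PySem.List.pyRange (len_s - len_p - 1) (-1) (-1)).foldl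
    (fun ht i =>
      PySem.List.pySetD ht i
        (PySem.Int.mod (multiplier * PySem.List.pyGetD ht (i + 1) 0
          + ((PySem.List.pyGetD cs i ' ').toNat : Int)
          - y * ((PySem.List.pyGetD cs (i + len_p) ' ').toNat : Int)) prime))
    hash_table

-- ===== PORT B =====
def window_hash (s : List Char) (prime : Int) (multiplier : Int) : Int :=
  let ans := s.reverse.foldl (fun ans c => PySem.Int.mod (ans * multiplier + (c.toNat : Int)) prime) 0
  PySem.Int.mod ans prime

def create_hash_table_alt (s : String) (len_p : Int) (prime : Int) (multiplier : Int) : List Int :=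
  let cs := s.toList
  (PySem.List.pyRange 0 ((cs.length : Int) - len_p + 1) 1).map (fun i =>
    window_hash (PySem.List.slice cs (some i) (some (i + len_p))) prime multiplier)

-- ===== PRECONDITION & SPEC =====
-- Exactly A's non-raising inputs: A raises IndexError for len_p > len(s) or len_p < 0
-- (out-of-range window index) and ValueError/ZeroDivisionError for prime = 0.
def Pre_create_hash_table (s : String) (len_p : Int) (prime : Int) (multiplier : Int) : Prop :=
  0 ≤ len_p ∧ len_p ≤ (s.toList.length : Int) ∧ prime ≠ 0
instance (s : String) (len_p : Int) (prime : Int) (multiplier : Int) : Decidable (Pre_create_hash_table s len_p prime multiplier) := by unfold Pre_create_hash_table; infer_instance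

def pvWitness_create_hash_table : String × Int × Int × Int := ("abcab", 2, 97, 31)

def Spec_create_hash_table (s : String) (len_p : Int) (prime : Int) (multiplier : Int) (out : List Int) : Prop := out = create_hash_table_alt s len_p prime multiplier
instance (s : String) (len_p : Int) (prime : Int) (multiplier : Int) (out : List Int) : Decidable (Spec_create_hash_table s len_p prime multiplier out) := by unfold Spec_create_hash_table; infer_instance

-- ===== CLAIM (what is proved, stated in full; the proofs are below) =====
def Claim_equal_create_hash_table : Prop := ∀ (s : String) (len_p : Int) (prime : Int) (multiplier : Int), Dom_create_hash_table s len_p prime multiplier → Pre_create_hash_table s len_p prime multiplier → Spec_create_hash_table s len_p prime multiplier (create_hash_table s len_p prime multiplier)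

-- ===== LEMMAS AND PROOFS =====

def pvVal (m : Int) : List Char → Int
  | [] => 0
  | c :: t => pvVal m t * m + (c.toNat : Int)

lemma pymod_congr {a b p : Int} (h : a % p = b % p) : PySem.Int.mod a p = PySem.Int.mod b p := by
  have hd : (p ∣ a) ↔ (p ∣ b) := by
    rw [Int.dvd_iff_emod_eq_zero, Int.dvd_iff_emod_eq_zero, h]
  simp only [PySem.Int.mod, Int.fmod_eq_emod, h, hd]

lemma pymod_emod (a p : Int) : (PySem.Int.mod a p) % p = a % p := by
  simp only [PySem.Int.mod, Int.fmod_eq_emod]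
  split_ifs with h
  · simp [Int.emod_emod_of_dvd]
  · have : a % p + p = a % p + p * 1 := by ring
    rw [this, Int.add_mul_emod_self_left, Int.emod_emod_of_dvd _ dvd_rfl]

lemma pymod_modeq (a p : Int) : PySem.Int.mod a p ≡ a [ZMOD p] := pymod_emod a p

lemma fold_mod (p m : Int) : ∀ (l : List Char) (a : Int),
    l.foldl (fun ans c => PySem.Int.mod (ans * m + (c.toNat : Int)) p) (PySem.Int.mod a p)
      = PySem.Int.mod (l.foldl (fun ans c => ans * m + (c.toNat : Int)) a) p := by
  intro l
  induction l with
  | nil => intro a; rfl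
  | cons c t ih =>
    intro a
    simp only [List.foldl_cons]
    have h1 : PySem.Int.mod (PySem.Int.mod a p * m + (c.toNat : Int)) p
        = PySem.Int.mod (a * m + (c.toNat : Int)) p :=
      pymod_congr (Int.ModEq.add_right _ (Int.ModEq.mul_right m (pymod_modeq a p)))
    rw [h1, ← ih]

lemma foldr_val (m : Int) (l : List Char) :
    l.foldr (fun c acc => acc * m + (c.toNat : Int)) 0 = pvVal m l := by
  induction l with
  | nil => rfl
  | cons c t ih => simp [pvVal, ih]

lemma poly_hash_eq (l : List Char) (p m : Int) :
    poly_hash l p m = PySem.Int.mod (pvVal m l) p := by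
  have h0 : (0 : Int) = PySem.Int.mod 0 p := by simp [PySem.Int.mod]
  rw [poly_hash, h0, fold_mod, List.foldl_reverse, foldr_val]

lemma pymod_idem (a p : Int) : PySem.Int.mod (PySem.Int.mod a p) p = PySem.Int.mod a p :=
  pymod_congr (pymod_emod a p)

lemma window_hash_eq (l : List Char) (p m : Int) :
    window_hash l p m = PySem.Int.mod (pvVal m l) p := by
  have h : l.reverse.foldl (fun ans c => PySem.Int.mod (ans * m + (c.toNat : Int)) p) 0
      = PySem.Int.mod (pvVal m l) p := poly_hash_eq l p m
  rw [window_hash]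
  rw [h, pymod_idem]

lemma val_append (m : Int) (l : List Char) (c : Char) :
    pvVal m (l ++ [c]) = pvVal m l + m ^ l.length * (c.toNat : Int) := by
  induction l with
  | nil => simp [pvVal]
  | cons d t ih => simp [pvVal, ih]; ring

lemma rolling (cs : List Char) (m : Int) (k j : Nat) (hj : j + 1 + k ≤ cs.length) :
    pvVal m ((cs.drop j).take k)
      = ((cs[j]'(by omega)).toNat : Int) + m * pvVal m ((cs.drop (j+1)).take k)
        - m ^ k * ((cs[j+k]'(by omega)).toNat : Int) := by
  cases k with
  | zero => simp [pvVal]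
  | succ k' =>
    have hdrop : cs.drop j = cs[j]'(by omega) :: cs.drop (j+1) :=
      (List.getElem_cons_drop (by omega)).symm
    have hk' : k' < (cs.drop (j+1)).length := by simp [List.length_drop]; omega
    have htake : (cs.drop (j+1)).take (k'+1)
        = (cs.drop (j+1)).take k' ++ [(cs.drop (j+1))[k']'hk'] := by
      rw [List.take_add_one]
      simp [List.getElem?_eq_getElem hk']
    have hidx : (cs.drop (j+1))[k']'hk' = cs[j+1+k']'(by omega) := List.getElem_drop
    have hlen : ((cs.drop (j+1)).take k').length = k' := by
      simp [List.length_take, List.length_drop]; omega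
    rw [hdrop, List.take_succ_cons]
    simp only [pvVal]
    rw [htake, val_append, hlen, hidx]
    have : j + 1 + k' = j + (k' + 1) := by omega
    simp only [this]
    ring

lemma pyRange_down_nil : PySem.List.pyRange (-1) (-1) (-1) = [] := by decide

lemma pyRange_down_cons (j : Nat) :
    PySem.List.pyRange (j:Int) (-1) (-1) = (j:Int) :: PySem.List.pyRange ((j:Int)-1) (-1) (-1) := by
  simp only [PySem.List.pyRange]
  norm_num
  have e1 : (if (-1:Int) < (j:Int) then j + 1 else 0) = j + 1 := by split <;> omega
  have e2 : (if 0 < j then j else 0) = j := by split <;> omega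
  rw [e1, e2, List.range_succ_eq_map, List.map_cons, List.map_map]
  norm_num
  intro a _
  ring

def pvH (cs : List Char) (p m : Int) (k t : Nat) : Int :=
  PySem.Int.mod (pvVal m ((cs.drop t).take k)) p

lemma step_val (cs : List Char) (p m : Int) (k N j : Nat) (hN : N + k = cs.length)
    (hj : j + 1 ≤ N) :
    PySem.Int.mod (m * pvH cs p m k (j+1) + ((cs.getD j ' ').toNat : Int)
        - PySem.Int.powMod m k p * ((cs.getD (j+k) ' ').toNat : Int)) p
      = pvH cs p m k j := by
  have hjlen : j < cs.length := by omega
  have hjk : j + k < cs.length := by omega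
  rw [List.getD_eq_getElem _ _ hjlen, List.getD_eq_getElem _ _ hjk]
  simp only [pvH, PySem.Int.powMod]
  apply pymod_congr
  have h1 : m * PySem.Int.mod (pvVal m ((cs.drop (j+1)).take k)) p
        + ((cs[j]'hjlen).toNat : Int)
        - PySem.Int.mod (m ^ k) p * ((cs[j+k]'hjk).toNat : Int)
      ≡ m * pvVal m ((cs.drop (j+1)).take k) + ((cs[j]'hjlen).toNat : Int)
        - m ^ k * ((cs[j+k]'hjk).toNat : Int) [ZMOD p] :=
    Int.ModEq.sub (Int.ModEq.add_right _ ((pymod_modeq _ p).mul_left m))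
      ((pymod_modeq _ p).mul_right _)
  have h2 := rolling cs m k j (by omega)
  calc (m * PySem.Int.mod (pvVal m ((cs.drop (j+1)).take k)) p
        + ((cs[j]'hjlen).toNat : Int)
        - PySem.Int.mod (m ^ k) p * ((cs[j+k]'hjk).toNat : Int)) % p
      = (m * pvVal m ((cs.drop (j+1)).take k) + ((cs[j]'hjlen).toNat : Int)
        - m ^ k * ((cs[j+k]'hjk).toNat : Int)) % p := h1
    _ = (pvVal m ((cs.drop j).take k)) % p := by rw [h2]; ring_nf

lemma loop_inv (cs : List Char) (p m : Int) (k N : Nat) (hN : N + k = cs.length) :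
    ∀ (j : Nat) (T : List Int), j ≤ N → T.length = N + 1 →
    (∀ t : Nat, j ≤ t → t ≤ N → T.getD t 0 = pvH cs p m k t) →
    (((PySem.List.pyRange ((j:Int) - 1) (-1) (-1)).foldl
       (fun ht i => PySem.List.pySetD ht i
          (PySem.Int.mod (m * PySem.List.pyGetD ht (i + 1) 0
             + ((PySem.List.pyGetD cs i ' ').toNat : Int)
             - PySem.Int.powMod m k p * ((PySem.List.pyGetD cs (i + (k:Int)) ' ').toNat : Int)) p)) T).length = N + 1
    ∧ ∀ t : Nat, t ≤ N →
      ((PySem.List.pyRange ((j:Int) - 1) (-1) (-1)).foldl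
       (fun ht i => PySem.List.pySetD ht i
          (PySem.Int.mod (m * PySem.List.pyGetD ht (i + 1) 0
             + ((PySem.List.pyGetD cs i ' ').toNat : Int)
             - PySem.Int.powMod m k p * ((PySem.List.pyGetD cs (i + (k:Int)) ' ').toNat : Int)) p)) T).getD t 0
        = pvH cs p m k t) := by
  intro j
  induction j with
  | zero =>
    intro T _ hlen hinv
    have : ((0:Nat):Int) - 1 = (-1 : Int) := by norm_num
    rw [this, pyRange_down_nil]
    exact ⟨hlen, fun t ht => hinv t (Nat.zero_le t) ht⟩
  | succ j ih =>
    intro T hj hlen hinv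
    have hcast : (((j+1:Nat)):Int) - 1 = (j:Int) := by push_cast; ring
    rw [hcast, pyRange_down_cons, List.foldl_cons]
    -- the state after processing index j
    have hread : PySem.List.pyGetD T ((j:Int) + 1) 0 = pvH cs p m k (j+1) := by
      have : ((j:Int) + 1) = ((j+1 : Nat) : Int) := by push_cast; ring
      rw [this, PySem.List.pyGetD_natCast]
      exact hinv (j+1) (le_refl _) (by omega)
    have hrc1 : PySem.List.pyGetD cs (j:Int) ' ' = cs.getD j ' ' := PySem.List.pyGetD_natCast cs j ' '
    have hrc2 : PySem.List.pyGetD cs ((j:Int) + (k:Int)) ' ' = cs.getD (j+k) ' ' := by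
      have : ((j:Int) + (k:Int)) = ((j+k : Nat) : Int) := by push_cast; ring
      rw [this, PySem.List.pyGetD_natCast]
    have hv : PySem.Int.mod (m * PySem.List.pyGetD T ((j:Int) + 1) 0
             + ((PySem.List.pyGetD cs (j:Int) ' ').toNat : Int)
             - PySem.Int.powMod m k p * ((PySem.List.pyGetD cs ((j:Int) + (k:Int)) ' ').toNat : Int)) p
        = pvH cs p m k j := by
      rw [hread, hrc1, hrc2]
      exact step_val cs p m k N j hN (by omega)
    rw [hv]
    set T' := PySem.List.pySetD T (j:Int) (pvH cs p m k j) with hT'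
    have hT'set : T' = T.set j (pvH cs p m k j) := by
      rw [hT', PySem.List.pySetD_natCast]
    have hlen' : T'.length = N + 1 := by rw [hT'set, List.length_set, hlen]
    have hinv' : ∀ t : Nat, j ≤ t → t ≤ N → T'.getD t 0 = pvH cs p m k t := by
      intro t ht1 ht2
      rw [hT'set]
      rcases eq_or_ne t j with rfl | hne
      · have : t < T.length := by omega
        simp [List.getD, this]
      · have : (T.set j (pvH cs p m k j))[t]? = T[t]? := by
          rw [List.getElem?_set, if_neg (fun h : j = t => hne h.symm)]
        simp only [List.getD, this]
        exact hinv t (by omega) ht2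
    exact ih T' (by omega) hlen' hinv'

lemma alt_char (s : String) (p m : Int) (k : Nat) (hk : k ≤ s.toList.length) :
    create_hash_table_alt s (k:Int) p m
      = (List.range (s.toList.length - k + 1)).map (fun t => pvH s.toList p m k t) := by
  unfold create_hash_table_alt
  simp only []
  set cs := s.toList with hcs
  have h1 : (cs.length : Int) - (k:Int) + 1 = ((cs.length - k + 1 : Nat) : Int) := by push_cast; omega
  rw [h1, PySem.List.pyRange_zero_natCast, List.map_map]
  refine List.map_congr_left ?_
  intro t ht
  simp only [Function.comp]
  rw [PySem.List.slice_natCast_add, window_hash_eq]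
  rfl

theorem create_hash_table_spec : Claim_equal_create_hash_table := by
  unfold Claim_equal_create_hash_table Spec_create_hash_table
  intro s lp p m _ hpre
  obtain ⟨h0, hle, hp⟩ := hpre
  lift lp to Nat using h0 with k
  have hk : k ≤ s.toList.length := by exact_mod_cast hle
  rw [alt_char s p m k hk]
  unfold create_hash_table
  simp only []
  set cs := s.toList with hcs
  set N : Nat := cs.length - k with hNdef
  have hN : N + k = cs.length := by omega
  have hNi : (cs.length : Int) - (k:Int) = ((N:Nat) : Int) := by omega
  have hNi1 : ((N:Nat) : Int) + 1 = ((N+1 : Nat) : Int) := by push_cast; ring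
  rw [hNi, hNi1, Int.toNat_natCast, Int.toNat_natCast, PySem.List.slice_from_natCast]
  -- the seeded initial table
  set v0 := poly_hash (cs.drop N) p m with hv0
  set T0 := PySem.List.pySetD (List.replicate (N+1) 0) ((N:Nat):Int) v0 with hT0
  have hdlen : (cs.drop N).length = k := by simp [List.length_drop]; omega
  have hv0H : v0 = pvH cs p m k N := by
    rw [hv0, poly_hash_eq, pvH]
    congr 2
    rw [List.take_of_length_le (by omega)]
  have hT0set : T0 = (List.replicate (N+1) (0:Int)).set N v0 := by
    rw [hT0, PySem.List.pySetD_natCast]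
  have hT0len : T0.length = N + 1 := by rw [hT0set]; simp
  have hT0inv : ∀ t : Nat, N ≤ t → t ≤ N → T0.getD t 0 = pvH cs p m k t := by
    intro t ht1 ht2
    have : t = N := by omega
    subst this
    rw [hT0set, ← hv0H]
    have hlt : N < (List.replicate (N+1) (0:Int)).length := by simp
    simp [List.getD]
  have hloop := loop_inv cs p m k N hN N T0 (le_refl N) hT0len hT0inv
  obtain ⟨hRlen, hRval⟩ := hloop
  have hNm1 : ((N:Nat):Int) - (1:Int) = ((N:Nat):Int) - 1 := rfl
  apply List.ext_getElem
  · rw [hRlen]; simp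
  · intro t ht1 ht2
    have htN : t ≤ N := by rw [hRlen] at ht1; omega
    have hgd := hRval t htN
    rw [List.getD_eq_getElem _ _ ht1] at hgd
    rw [hgd]
    simp [pvH]
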